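-- pv_equiv track=rewrite | github.com/YacineCC/UNI | L2/Salah/I33/TP4/exam4.py | eval_poly_F2
-- ===== SOURCE A (Python) =====
-- def eval_poly_F2(P,b):
-- 	d = len(P)-1
-- 	res = P[d]
-- 	while d > 0:
-- 		res *= b
-- 		res += P[d-1]
-- 		d -= 1
-- 	return res%2
-- ===== SOURCE B (Python) =====
-- def eval_poly_F2(P, b):
--     res = 0
--     p = 1
--     for c in P:
--         res += c * p
--         p *= b
--     return res % 2
-- ===== Notes on version B (the rewrite author's own statement) =====
-- stated objective: simpler
-- what changed: Replaces the index-based backwards Horner while-loop (res = P[d]; res = res*b + P[d-1]) with a forward single pass over the list keeping a running sum and a running power of b, reduced mod 2.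
-- crash fix: On the empty list A raises IndexError (it reads P[len(P)-1]); B returns 0, the empty-sum value mod 2. — e.g. on eval_poly_F2([], 3): A raises IndexError, B returns 0
import Mathlib
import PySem

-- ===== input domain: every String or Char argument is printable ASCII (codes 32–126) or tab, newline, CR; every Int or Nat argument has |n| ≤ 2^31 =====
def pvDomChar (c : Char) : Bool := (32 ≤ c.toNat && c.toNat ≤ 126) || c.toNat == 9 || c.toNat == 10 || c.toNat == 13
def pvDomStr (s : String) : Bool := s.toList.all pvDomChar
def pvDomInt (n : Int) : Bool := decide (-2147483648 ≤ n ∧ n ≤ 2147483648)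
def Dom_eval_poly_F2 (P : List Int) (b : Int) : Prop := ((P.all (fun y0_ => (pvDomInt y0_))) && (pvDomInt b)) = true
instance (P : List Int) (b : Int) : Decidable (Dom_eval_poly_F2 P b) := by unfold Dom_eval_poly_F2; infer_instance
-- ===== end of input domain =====

-- B replaces A's index-based backwards Horner while-loop by a forward power-basis
-- accumulation (running sum + running power over the list itself), reduced mod 2.

-- ===== PORT A =====
-- while d > 0: res *= b; res += P[d-1]; d -= 1   (d counts down; here as structural recursion on d)
def evalLoopA (P : List Int) (b : Int) : Nat → Int → Int
  | 0, res => res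
  | Nat.succ k, res => evalLoopA P b k (res * b + PySem.List.pyGetD P (k : Int) 0)

def eval_poly_F2 (P : List Int) (b : Int) : Int :=
  let d : Int := (P.length : Int) - 1
  let res : Int := PySem.List.pyGetD P d 0   -- P[d]; IndexError (P = []) excluded by Pre_
  PySem.Int.mod (evalLoopA P b d.toNat res) 2

-- ===== PORT B =====
-- res = 0; p = 1; for c in P: res += c*p; p *= b; return res % 2
def eval_poly_F2_alt (P : List Int) (b : Int) : Int :=
  let rp := P.foldl (fun (s : Int × Int) c => (s.1 + c * s.2, s.2 * b)) (0, 1)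
  PySem.Int.mod rp.1 2

-- ===== PRECONDITION & SPEC =====
-- A raises IndexError on the empty list (it reads P[len(P)-1]); Pre_ excludes exactly that.
def Pre_eval_poly_F2 (P : List Int) (b : Int) : Prop := P ≠ []
instance (P : List Int) (b : Int) : Decidable (Pre_eval_poly_F2 P b) := by unfold Pre_eval_poly_F2; infer_instance
def pvWitness_eval_poly_F2 : List Int × Int := ([1, 0, 1], 3)

-- On the empty list A raises IndexError; B returns 0, the empty sum reduced mod 2.
def Raises_eval_poly_F2 (P : List Int) (b : Int) : Prop := P = []
instance (P : List Int) (b : Int) : Decidable (Raises_eval_poly_F2 P b) := by unfold Raises_eval_poly_F2; infer_instance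
def pvRaiseWitness_eval_poly_F2 : List Int × Int := ([], 3)
def pvRaiseWitnessOut_eval_poly_F2 : Int := 0

def Spec_eval_poly_F2 (P : List Int) (b : Int) (out : Int) : Prop := out = eval_poly_F2_alt P b
instance (P : List Int) (b : Int) (out : Int) : Decidable (Spec_eval_poly_F2 P b out) := by unfold Spec_eval_poly_F2; infer_instance

-- ===== CLAIM =====
def Claim_equal_eval_poly_F2 : Prop := ∀ (P : List Int) (b : Int), Dom_eval_poly_F2 P b → Pre_eval_poly_F2 P b → Spec_eval_poly_F2 P b (eval_poly_F2 P b)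
def Claim_raises_eval_poly_F2 : Prop := (∀ (P : List Int) (b : Int), Dom_eval_poly_F2 P b → Raises_eval_poly_F2 P b → ¬ Pre_eval_poly_F2 P b) ∧ (Dom_eval_poly_F2 (pvRaiseWitness_eval_poly_F2.1) (pvRaiseWitness_eval_poly_F2.2) ∧ Raises_eval_poly_F2 (pvRaiseWitness_eval_poly_F2.1) (pvRaiseWitness_eval_poly_F2.2) ∧ eval_poly_F2_alt (pvRaiseWitness_eval_poly_F2.1) (pvRaiseWitness_eval_poly_F2.2) = pvRaiseWitnessOut_eval_poly_F2)

-- ===== LEMMAS AND PROOFS =====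
-- the common value: Σ_i P_i b^i written as a right fold
def polyB (b : Int) : List Int → Int
  | [] => 0
  | c :: r => c + b * polyB b r

theorem polyB_append_single (b : Int) (xs : List Int) (c : Int) :
    polyB b (xs ++ [c]) = polyB b xs + b ^ xs.length * c := by
  induction xs with
  | nil => simp [polyB]
  | cons x t ih => simp [polyB, ih, pow_succ]; ring

theorem powfold_eq (b : Int) (P : List Int) (acc p : Int) :
    (P.foldl (fun (s : Int × Int) c => (s.1 + c * s.2, s.2 * b)) (acc, p)).1
      = acc + p * polyB b P := by
  induction P generalizing acc p with
  | nil => simp [polyB]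
  | cons c t ih =>
    simp only [List.foldl_cons]
    rw [ih]
    simp [polyB]
    ring

theorem evalLoopA_eq (P : List Int) (b : Int) :
    ∀ (d : Nat), d ≤ P.length → ∀ res : Int,
      evalLoopA P b d res = polyB b (P.take d) + res * b ^ d := by
  intro d
  induction d with
  | zero => intro _ res; simp [evalLoopA, polyB]
  | succ k ih =>
    intro hd res
    have hk : k < P.length := Nat.lt_of_succ_le hd
    rw [evalLoopA, ih (Nat.le_of_lt hk)]
    have hget : PySem.List.pyGetD P (k : Int) 0 = P[k] := by
      rw [PySem.List.pyGetD_eq_getElem P 0 (by positivity) (by exact_mod_cast hk)]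
      simp
    have htake : P.take (k+1) = P.take k ++ [P[k]] := by
      rw [List.take_add_one, List.getElem?_eq_getElem hk]
      rfl
    rw [hget, htake, polyB_append_single]
    simp [List.length_take, Nat.min_eq_left (Nat.le_of_lt hk), pow_succ]
    ring

-- ===== VERDICT =====
theorem eval_poly_F2_spec : Claim_equal_eval_poly_F2 := by
  intro P b _ hP
  unfold Spec_eval_poly_F2 eval_poly_F2 eval_poly_F2_alt
  have hn : 0 < P.length := List.length_pos_iff.mpr hP
  have hd : ((P.length : Int) - 1).toNat = P.length - 1 := by omega
  have hlt : P.length - 1 < P.length := by omega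
  have hres : PySem.List.pyGetD P ((P.length : Int) - 1) 0 = P[P.length - 1] := by
    rw [PySem.List.pyGetD_eq_getElem P 0 (by omega) (by omega)]
    simp only [hd]
  simp only [hd, hres]
  rw [evalLoopA_eq P b (P.length - 1) (by omega)]
  have hdrop : List.drop (P.length - 1) P = [P[P.length - 1]] := by
    rw [List.drop_eq_getElem_cons hlt]
    have h1 : P.length - 1 + 1 = P.length := by omega
    rw [h1, List.drop_length]
  have hsplit : P.take (P.length - 1) ++ [P[P.length - 1]] = P := by
    rw [← hdrop, List.take_append_drop]
  have hP2 : polyB b P = polyB b (P.take (P.length - 1)) + b ^ (P.length - 1) * P[P.length - 1] := by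
    conv_lhs => rw [← hsplit]
    rw [polyB_append_single]
    simp [List.length_take]
  rw [powfold_eq b P 0 1, hP2]
  ring_nf

@[simp] theorem eval_poly_F2_raises : Claim_raises_eval_poly_F2 := by
  unfold Claim_raises_eval_poly_F2
  exact ⟨fun P b _ h => by simp [Pre_eval_poly_F2, Raises_eval_poly_F2] at *; exact h, by decide⟩
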